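-- pv_equiv track=rewrite | github.com/B0dz1o/arrayArrange | quasi_sort.py | find_offset
-- ===== SOURCE A (Python) =====
-- def find_offset(arr):
--   """
--   Calculate where in the resulting array, zeroes and positive numbers, respectively, should start
--   """
--   offsetZer = 0
--   offsetPos = 0
--   for elem in arr:
--     if elem < 0:
--       offsetPos += 1
--       offsetZer += 1
--     if elem == 0:
--       offsetPos += 1
--   return (offsetZer, offsetPos)
-- ===== SOURCE B (Python) =====
-- def find_offset(arr):
--   """
--   Calculate where in the resulting array, zeroes and positive numbers, respectively, should start
--   """
--   neg = sum(1 for e in arr if e < 0)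
--   nonpos = sum(1 for e in arr if e <= 0)
--   return (neg, nonpos)
-- ===== Notes on version B (the rewrite author's own statement) =====
-- stated objective: simpler
-- what changed: Replaces the single fused loop updating two accumulators with two independent counting passes (count of e<0 and count of e<=0, using offsetPos = non-positives).
import Mathlib
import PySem

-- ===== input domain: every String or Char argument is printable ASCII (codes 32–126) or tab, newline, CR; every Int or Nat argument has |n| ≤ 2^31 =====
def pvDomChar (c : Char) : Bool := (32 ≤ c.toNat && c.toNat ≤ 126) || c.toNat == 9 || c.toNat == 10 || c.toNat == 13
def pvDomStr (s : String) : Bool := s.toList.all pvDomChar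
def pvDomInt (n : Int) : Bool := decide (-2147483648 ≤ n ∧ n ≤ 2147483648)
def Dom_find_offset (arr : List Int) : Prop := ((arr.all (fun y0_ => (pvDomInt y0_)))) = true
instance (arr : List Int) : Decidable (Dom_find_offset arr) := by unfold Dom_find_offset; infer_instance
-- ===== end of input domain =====

-- B replaces A's single fused two-accumulator loop with two independent counting passes (simpler).

-- ===== PORT A =====
-- literal transliteration of A: one loop, two accumulators updated by two ifs
def find_offset (arr : List Int) : Int × Int :=
  arr.foldl
    (fun (st : Int × Int) elem =>
      let st := if elem < 0 then (st.1 + 1, st.2 + 1) else st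
      if elem = 0 then (st.1, st.2 + 1) else st)
    (0, 0)

-- ===== PORT B =====
-- two separate counting passes
def find_offset_alt (arr : List Int) : Int × Int :=
  ((arr.countP (fun e => e < 0) : Int), (arr.countP (fun e => e ≤ 0) : Int))

-- ===== PRECONDITION & SPEC =====
def Spec_find_offset (arr : List Int) (out : Int × Int) : Prop := out = find_offset_alt arr
instance (arr : List Int) (out : Int × Int) : Decidable (Spec_find_offset arr out) := by unfold Spec_find_offset; infer_instance

-- ===== CLAIM (what is proved, stated in full; the proofs are below) =====
def Claim_equal_find_offset : Prop := ∀ (arr : List Int), Dom_find_offset arr → Spec_find_offset arr (find_offset arr)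

-- ===== LEMMAS AND PROOFS =====
theorem find_offset_foldl_shift (arr : List Int) (z p : Int) :
    arr.foldl
      (fun (st : Int × Int) elem =>
        let st := if elem < 0 then (st.1 + 1, st.2 + 1) else st
        if elem = 0 then (st.1, st.2 + 1) else st)
      (z, p)
    = (z + (arr.countP (fun e => e < 0) : Int), p + (arr.countP (fun e => e ≤ 0) : Int)) := by
  induction arr generalizing z p with
  | nil => simp
  | cons a t ih =>
    simp only [List.foldl_cons, List.countP_cons]
    by_cases h1 : a < 0
    · have h2 : ¬ a = 0 := by omega
      have h3 : a ≤ 0 := by omega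
      simp [h1, h2, h3, ih]
      constructor <;> push_cast <;> ring
    · by_cases h2 : a = 0
      · have h3 : a ≤ 0 := by omega
        simp [h1, h2, h3, ih]
        push_cast; ring
      · have h3 : ¬ a ≤ 0 := by omega
        simp [h1, h2, h3, ih]

-- ===== VERDICT (by name: the statement is the Claim_ definition above) =====
theorem find_offset_spec : Claim_equal_find_offset := by
  intro arr _
  show find_offset arr = find_offset_alt arr
  unfold find_offset find_offset_alt
  simpa using find_offset_foldl_shift arr 0 0
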